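-- pv_equiv track=rewrite | github.com/shaileshp51/pyDelPhi | pydelphi/tests/test_pydelphi_energy_regression.back.py | get_test_combinations
-- ===== SOURCE A (Python) =====
-- def get_test_combinations(
--     skip_cuda=False, skip_parallel=False, skip_single=False, skip_double=False
-- ):
--     all_combinations = [
--         ("cpu", "single", 1),
--         ("cpu", "double", 1),
--         ("cpu", "single", 4),
--         ("cpu", "double", 4),
--         ("cuda", "single", 1),
--         ("cuda", "double", 1),
--         ("cuda", "single", 4),
--         ("cuda", "double", 4),
--     ]
--
--     filtered = []
--     for platform, precision, threads in all_combinations: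
--         if skip_cuda and platform == "cuda":
--             continue
--         if skip_parallel and threads > 1:
--             continue
--         if skip_single and precision == "single":
--             continue
--         if skip_double and precision == "double":
--             continue
--         filtered.append((platform, precision, threads))
--
--     return filtered
-- ===== SOURCE B (Python) =====
-- def get_test_combinations(
--     skip_cuda=False, skip_parallel=False, skip_single=False, skip_double=False
-- ):
--     platforms = ["cpu"] + ([] if skip_cuda else ["cuda"])
--     threads = [1] + ([] if skip_parallel else [4])
--     precisions = [
--         p
--         for p in ("single", "double")
--         if not (skip_single and p == "single")
--         and not (skip_double and p == "double")
--     ]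
--     return [
--         (plat, prec, t) for plat in platforms for t in threads for prec in precisions
--     ]
-- ===== Notes on version B (the rewrite author's own statement) =====
-- stated objective: idiomatic
-- what changed: Replaces the hardcoded 8-tuple list filtered by four guard clauses with per-axis allowed-value lists (platforms, threads, precisions) combined as a Cartesian product in the original nesting order.
import Mathlib
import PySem

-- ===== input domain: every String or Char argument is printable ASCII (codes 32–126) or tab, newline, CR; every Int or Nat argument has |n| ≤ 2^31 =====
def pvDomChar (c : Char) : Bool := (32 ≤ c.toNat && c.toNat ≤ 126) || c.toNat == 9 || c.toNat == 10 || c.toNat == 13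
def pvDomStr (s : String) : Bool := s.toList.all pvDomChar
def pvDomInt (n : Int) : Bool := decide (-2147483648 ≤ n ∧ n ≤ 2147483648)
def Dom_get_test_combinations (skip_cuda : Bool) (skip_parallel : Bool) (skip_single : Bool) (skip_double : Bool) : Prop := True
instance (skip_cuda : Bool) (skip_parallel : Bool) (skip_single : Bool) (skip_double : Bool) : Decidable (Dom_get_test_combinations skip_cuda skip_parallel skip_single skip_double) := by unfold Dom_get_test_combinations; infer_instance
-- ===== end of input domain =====

-- B builds the result as the Cartesian product of per-axis allowed values instead of filtering a hardcoded list (idiomatic decomposition).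


-- ===== PORT A =====
-- Port of A: fold over the fixed all_combinations list, skipping per the four guards.
def get_test_combinations (skip_cuda : Bool) (skip_parallel : Bool) (skip_single : Bool) (skip_double : Bool) : List (String × String × Int) :=
  let all_combinations : List (String × String × Int) :=
    [("cpu", "single", 1), ("cpu", "double", 1), ("cpu", "single", 4), ("cpu", "double", 4),
     ("cuda", "single", 1), ("cuda", "double", 1), ("cuda", "single", 4), ("cuda", "double", 4)]
  all_combinations.foldl
    (fun filtered x =>
      let platform := x.1; let precision := x.2.1; let threads := x.2.2
      if skip_cuda && platform == "cuda" then filtered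
      else if skip_parallel && threads > 1 then filtered
      else if skip_single && precision == "single" then filtered
      else if skip_double && precision == "double" then filtered
      else filtered ++ [(platform, precision, threads)])
    []

-- ===== PORT B =====
-- Port of B: per-axis allowed values, then the Cartesian product (platform > threads > precision).
def get_test_combinations_alt (skip_cuda : Bool) (skip_parallel : Bool) (skip_single : Bool) (skip_double : Bool) : List (String × String × Int) :=
  let platforms : List String := ["cpu"] ++ (if skip_cuda then [] else ["cuda"])
  let threads : List Int := [1] ++ (if skip_parallel then [] else [4])
  let precisions : List String :=
    (["single", "double"] : List String).filter
      (fun p => !(skip_single && p == "single") && !(skip_double && p == "double"))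
  platforms.flatMap (fun plat => threads.flatMap (fun t => precisions.map (fun prec => (plat, prec, t))))

-- ===== PRECONDITION & SPEC =====
def Spec_get_test_combinations (skip_cuda : Bool) (skip_parallel : Bool) (skip_single : Bool) (skip_double : Bool) (out : List (String × String × Int)) : Prop := out = get_test_combinations_alt skip_cuda skip_parallel skip_single skip_double
instance (skip_cuda : Bool) (skip_parallel : Bool) (skip_single : Bool) (skip_double : Bool) (out : List (String × String × Int)) : Decidable (Spec_get_test_combinations skip_cuda skip_parallel skip_single skip_double out) := by unfold Spec_get_test_combinations; infer_instance

-- ===== CLAIM (what is proved, stated in full; the proofs are below) =====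
def Claim_equal_get_test_combinations : Prop := ∀ (skip_cuda : Bool) (skip_parallel : Bool) (skip_single : Bool) (skip_double : Bool), Dom_get_test_combinations skip_cuda skip_parallel skip_single skip_double → Spec_get_test_combinations skip_cuda skip_parallel skip_single skip_double (get_test_combinations skip_cuda skip_parallel skip_single skip_double)

-- ===== LEMMAS AND PROOFS =====

-- ===== VERDICT (by name: the statement is the Claim_ definition above) =====
theorem get_test_combinations_spec : Claim_equal_get_test_combinations := by
  unfold Claim_equal_get_test_combinations
  intro a b c d _
  unfold Spec_get_test_combinations
  cases a <;> cases b <;> cases c <;> cases d <;> decide
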